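-- pv_equiv track=rewrite | github.com/fokerman/microOrgaSmall | OrgaSmallWithIO/tools/common.py | removeLabels
-- ===== SOURCE A (Python) =====
-- def_DB  = ["DB"]
--
-- def removeLabels(tokens):
--     instCount=0
--     reserveLabel=':'
--     instructions=[]
--     labels={}
--     for t in tokens:
--         if len(t)<2:
--             raise ValueError("Error: Can not convert \"" + t[0] + "\"")
--             return None, None
--         if t[1]==reserveLabel:
--             labels[t[0]]=instCount
--             if len(t)>2:
--                 instructions=instructions+[t[2:]]
--                 if t[2] in def_DB:
--                     instCount=instCount+1
--                 else:
--                     instCount=instCount+2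
--         else:
--             instructions=instructions+[t[0:]]
--             if t[0] in def_DB:
--                 instCount=instCount+1
--             else:
--                 instCount=instCount+2
--     return instructions,labels
-- ===== SOURCE B (Python) =====
-- def_DB = ["DB"]
--
-- def removeLabels(tokens):
--     instructions = []
--     sizes = []          # size (1 or 2) of each instruction
--     recs = []           # (label name, index of the next instruction at record time)
--     for t in tokens:
--         if len(t) < 2:
--             raise ValueError("Error: Can not convert \"" + t[0] + "\"")
--         if t[1] == ':':
--             recs.append((t[0], len(sizes)))
--             if len(t) > 2:
--                 instructions.append(t[2:])
--                 sizes.append(1 if t[2] in def_DB else 2)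
--         else:
--             instructions.append(t[:])
--             sizes.append(1 if t[0] in def_DB else 2)
--     prefix = [0]
--     for s in sizes:
--         prefix.append(prefix[-1] + s)
--     labels = {}
--     for name, idx in recs:
--         labels[name] = prefix[idx]
--     return instructions, labels
-- ===== Notes on version B (the rewrite author's own statement) =====
-- stated objective: alternative
-- what changed: B records label positions as instruction indices in one appending pass and resolves their offsets afterwards via a prefix-sum array over a per-instruction size list, instead of A's single running instCount and O(n^2) list rebuilding (instructions=instructions+[...]).
import Mathlib
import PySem

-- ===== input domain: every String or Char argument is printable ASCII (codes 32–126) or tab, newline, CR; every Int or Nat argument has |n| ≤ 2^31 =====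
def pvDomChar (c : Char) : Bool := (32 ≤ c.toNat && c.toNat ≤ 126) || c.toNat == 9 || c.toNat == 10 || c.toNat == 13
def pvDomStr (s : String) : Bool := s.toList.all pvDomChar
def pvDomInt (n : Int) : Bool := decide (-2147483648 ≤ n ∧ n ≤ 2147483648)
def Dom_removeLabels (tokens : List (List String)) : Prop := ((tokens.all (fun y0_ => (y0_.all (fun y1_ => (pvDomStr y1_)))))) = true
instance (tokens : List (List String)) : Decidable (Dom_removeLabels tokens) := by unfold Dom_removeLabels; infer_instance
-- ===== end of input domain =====

-- B keeps instruction indices and a size list, then assigns label offsets from a prefix-sum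
-- array in a second pass (alternative decomposition; B also appends instead of rebuilding the list).

-- ===== PORT A =====
-- state: (instCount, instructions, labels); the len(t)<2 branch raises in Python (excluded by Pre_),
-- the port leaves the state unchanged there.
def pvStepA (st : Int × List (List String) × PySem.Dict String Int) (t : List String) :
    Int × List (List String) × PySem.Dict String Int :=
  let (instCount, instructions, labels) := st
  if t.length < 2 then st
  else if t.getD 1 "" = ":" then
    let labels := labels.insert (t.getD 0 "") instCount
    if 2 < t.length then
      let instructions := instructions ++ [t.drop 2]   -- t[2:]
      if t.getD 2 "" ∈ ["DB"] then (instCount + 1, instructions, labels)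
      else (instCount + 2, instructions, labels)
    else (instCount, instructions, labels)
  else
    let instructions := instructions ++ [t]            -- t[0:]
    if t.getD 0 "" ∈ ["DB"] then (instCount + 1, instructions, labels)
    else (instCount + 2, instructions, labels)

def removeLabels (tokens : List (List String)) : List (List String) × (List (String × Int)) :=
  let st := tokens.foldl pvStepA (0, [], PySem.Dict.empty)
  (st.2.1, st.2.2.items)

-- ===== PORT B =====
-- first pass state: (instructions, sizes, recs)
def pvStepB (st : List (List String) × List Int × List (String × Nat)) (t : List String) :
    List (List String) × List Int × List (String × Nat) :=
  let (instructions, sizes, recs) := st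
  if t.length < 2 then st   -- Python raises here (excluded by Pre_)
  else if t.getD 1 "" = ":" then
    let recs := recs ++ [(t.getD 0 "", sizes.length)]
    if 2 < t.length then
      (instructions ++ [t.drop 2],
       sizes ++ [if t.getD 2 "" ∈ ["DB"] then (1 : Int) else 2], recs)
    else (instructions, sizes, recs)
  else
    (instructions ++ [t],
     sizes ++ [if t.getD 0 "" ∈ ["DB"] then (1 : Int) else 2], recs)

def removeLabels_alt (tokens : List (List String)) : List (List String) × (List (String × Int)) :=
  let st := tokens.foldl pvStepB ([], [], [])
  let instructions := st.1
  let sizes := st.2.1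
  let recs := st.2.2
  let pfx := sizes.foldl (fun acc s => acc ++ [(acc.getLast?.getD 0) + s]) [(0 : Int)]
  let labels := recs.foldl
    (fun (d : PySem.Dict String Int) r => d.insert r.1 (pfx.getD r.2 0)) PySem.Dict.empty
  (instructions, labels.items)

-- ===== PRECONDITION & SPEC =====
-- Pre_ excludes exactly the tokens lists containing a token of length < 2, on which Python A
-- raises (ValueError, or IndexError for an empty token while building the message).
def Pre_removeLabels (tokens : List (List String)) : Prop :=
  ∀ t ∈ tokens, 2 ≤ t.length
instance (tokens : List (List String)) : Decidable (Pre_removeLabels tokens) := by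
  unfold Pre_removeLabels; infer_instance

def pvWitness_removeLabels : List (List String) :=
  [["L1", ":"], ["MOV", "x"], ["L2", ":", "DB", "7"], ["DB", "3"]]

def Spec_removeLabels (tokens : List (List String)) (out : List (List String) × (List (String × Int))) : Prop := out = removeLabels_alt tokens
instance (tokens : List (List String)) (out : List (List String) × (List (String × Int))) : Decidable (Spec_removeLabels tokens out) := by unfold Spec_removeLabels; infer_instance

-- ===== CLAIM (what is proved, stated in full; the proofs are below) =====
def Claim_equal_removeLabels : Prop := ∀ (tokens : List (List String)), Dom_removeLabels tokens → Pre_removeLabels tokens → Spec_removeLabels tokens (removeLabels tokens)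

-- ===== LEMMAS AND PROOFS =====

-- labels dict described from B's record list and a size list, via sums of take-prefixes
def pvMkLabels (recs : List (String × Nat)) (sizes : List Int) : PySem.Dict String Int :=
  recs.foldl (fun d r => d.insert r.1 ((sizes.take r.2).sum)) PySem.Dict.empty

-- the prefix-sum list B builds
def pvPrefix (sizes : List Int) : List Int :=
  sizes.foldl (fun acc s => acc ++ [(acc.getLast?.getD 0) + s]) [(0 : Int)]

theorem pvPrefix_append (sizes : List Int) (s : Int) :
    pvPrefix (sizes ++ [s]) = pvPrefix sizes ++ [(pvPrefix sizes).getLast?.getD 0 + s] := by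
  simp [pvPrefix]

theorem pvPrefix_length (sizes : List Int) :
    (pvPrefix sizes).length = sizes.length + 1 := by
  induction sizes using List.reverseRecOn with
  | nil => simp [pvPrefix]
  | append_singleton sizes s ih => simp [pvPrefix_append, ih]

theorem pvPrefix_spec (sizes : List Int) :
    (pvPrefix sizes).getLast?.getD 0 = sizes.sum ∧
    ∀ i ≤ sizes.length, (pvPrefix sizes).getD i 0 = (sizes.take i).sum := by
  induction sizes using List.reverseRecOn with
  | nil => simp [pvPrefix]
  | append_singleton sizes s ih =>
    obtain ⟨hlast, hget⟩ := ih
    rw [pvPrefix_append]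
    constructor
    · simp [hlast]
    · intro i hi
      by_cases hil : i ≤ sizes.length
      · rw [List.getD_append _ _ _ _ (by rw [pvPrefix_length]; omega), hget i hil,
          List.take_append_of_le_length hil]
      · have hi2 : i ≤ sizes.length + 1 := by simpa using hi
        have hi' : i = sizes.length + 1 := by omega
        subst hi'
        rw [List.getD_append_right _ _ _ _ (by rw [pvPrefix_length])]
        have ht : (sizes ++ [s]).take (sizes.length + 1) = sizes ++ [s] :=
          List.take_of_length_le (by simp)
        simp [pvPrefix_length, hlast, ht]

theorem pvMkLabelsFrom_stable (recs : List (String × Nat)) (d : PySem.Dict String Int)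
    (sizes : List Int) (s : Int) (h : ∀ r ∈ recs, r.2 ≤ sizes.length) :
    recs.foldl (fun d r => d.insert r.1 (((sizes ++ [s]).take r.2).sum)) d =
    recs.foldl (fun d r => d.insert r.1 ((sizes.take r.2).sum)) d := by
  induction recs generalizing d with
  | nil => rfl
  | cons r rs ih =>
    simp only [List.foldl_cons]
    rw [List.take_append_of_le_length (h r (by simp))]
    exact ih _ (fun r hr => h r (by simp [hr]))

theorem pvMkLabels_stable (recs : List (String × Nat)) (sizes : List Int) (s : Int)
    (h : ∀ r ∈ recs, r.2 ≤ sizes.length) :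
    pvMkLabels recs (sizes ++ [s]) = pvMkLabels recs sizes :=
  pvMkLabelsFrom_stable recs _ sizes s h

theorem pvMkLabels_append (recs : List (String × Nat)) (sizes : List Int) (n : String) (i : Nat) :
    pvMkLabels (recs ++ [(n, i)]) sizes =
      (pvMkLabels recs sizes).insert n ((sizes.take i).sum) := by
  simp [pvMkLabels, List.foldl_append]

-- indices recorded by B's first pass stay within the size list
def pvInvB (st : List (List String) × List Int × List (String × Nat)) : Prop :=
  ∀ r ∈ st.2.2, r.2 ≤ st.2.1.length

theorem pvStepB_inv (st : List (List String) × List Int × List (String × Nat))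
    (t : List String) (h : pvInvB st) : pvInvB (pvStepB st t) := by
  obtain ⟨ins, sizes, recs⟩ := st
  unfold pvStepB pvInvB at *
  dsimp only at h ⊢
  split_ifs
  all_goals intro r hr
  all_goals simp only [List.mem_append, List.mem_singleton, List.length_append,
    List.length_cons, List.length_nil] at hr ⊢
  all_goals first
    | (have := h r hr; omega)
    | (rcases hr with hr | hr
       · have := h r hr; omega
       · subst hr; simp)

theorem pvFoldB_inv (tokens : List (List String))
    (st : List (List String) × List Int × List (String × Nat)) (h : pvInvB st) :
    pvInvB (tokens.foldl pvStepB st) := by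
  induction tokens generalizing st with
  | nil => exact h
  | cons t ts ih => exact ih _ (pvStepB_inv st t h)

theorem pvBump (recs : List (String × Nat)) (sizes : List Int) (k : Int)
    (h : ∀ r ∈ recs, r.2 ≤ sizes.length) :
    ∀ r ∈ recs, r.2 ≤ (sizes ++ [k]).length := by
  intro r hr
  simp only [List.length_append, List.length_cons, List.length_nil]
  exact Nat.le_succ_of_le (h r hr)

-- core invariant: A's running state is determined by B's first-pass state
theorem pvMain (tokens : List (List String)) :
    ∀ (ins : List (List String)) (sizes : List Int) (recs : List (String × Nat)),
    (∀ r ∈ recs, r.2 ≤ sizes.length) →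
    tokens.foldl pvStepA (sizes.sum, ins, pvMkLabels recs sizes) =
      ((tokens.foldl pvStepB (ins, sizes, recs)).2.1.sum,
       (tokens.foldl pvStepB (ins, sizes, recs)).1,
       pvMkLabels (tokens.foldl pvStepB (ins, sizes, recs)).2.2
         (tokens.foldl pvStepB (ins, sizes, recs)).2.1) := by
  induction tokens with
  | nil => intro ins sizes recs _; rfl
  | cons t ts ih =>
    intro ins sizes recs h
    simp only [List.foldl_cons]
    by_cases h1 : t.length < 2
    · rw [show pvStepA (sizes.sum, ins, pvMkLabels recs sizes) t
            = (sizes.sum, ins, pvMkLabels recs sizes) by simp [pvStepA, h1],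
          show pvStepB (ins, sizes, recs) t = (ins, sizes, recs) by simp [pvStepB, h1]]
      exact ih ins sizes recs h
    · by_cases h2 : t.getD 1 "" = ":"
      · have hrec1 : ∀ r ∈ recs ++ [(t.getD 0 "", sizes.length)], r.2 ≤ sizes.length := by
          intro r hr
          simp only [List.mem_append, List.mem_singleton] at hr
          rcases hr with hr | hr
          · exact h r hr
          · subst hr; simp
        by_cases h3 : 2 < t.length
        · set k : Int := if t.getD 2 "" ∈ ["DB"] then 1 else 2 with hk
          have hA : pvStepA (sizes.sum, ins, pvMkLabels recs sizes) t
              = ((sizes ++ [k]).sum, ins ++ [t.drop 2],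
                 pvMkLabels (recs ++ [(t.getD 0 "", sizes.length)]) (sizes ++ [k])) := by
            rw [pvMkLabels_stable _ _ _ hrec1, pvMkLabels_append, List.take_length]
            simp only [pvStepA, hk]
            rw [if_neg h1, if_pos h2, if_pos h3]
            split_ifs <;> simp
          have hB : pvStepB (ins, sizes, recs) t
              = (ins ++ [t.drop 2], sizes ++ [k], recs ++ [(t.getD 0 "", sizes.length)]) := by
            simp only [pvStepB, hk]
            rw [if_neg h1, if_pos h2, if_pos h3]
          rw [hA, hB]
          exact ih _ _ _ (pvBump _ _ _ hrec1)
        · have hA : pvStepA (sizes.sum, ins, pvMkLabels recs sizes) t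
              = (sizes.sum, ins, pvMkLabels (recs ++ [(t.getD 0 "", sizes.length)]) sizes) := by
            rw [pvMkLabels_append, List.take_length]
            simp only [pvStepA]
            rw [if_neg h1, if_pos h2, if_neg h3]
          have hB : pvStepB (ins, sizes, recs) t
              = (ins, sizes, recs ++ [(t.getD 0 "", sizes.length)]) := by
            simp only [pvStepB]
            rw [if_neg h1, if_pos h2, if_neg h3]
          rw [hA, hB]
          exact ih _ _ _ hrec1
      · set k : Int := if t.getD 0 "" ∈ ["DB"] then 1 else 2 with hk
        have hA : pvStepA (sizes.sum, ins, pvMkLabels recs sizes) t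
            = ((sizes ++ [k]).sum, ins ++ [t], pvMkLabels recs (sizes ++ [k])) := by
          rw [pvMkLabels_stable _ _ _ h]
          simp only [pvStepA, hk]
          rw [if_neg h1, if_neg h2]
          split_ifs <;> simp
        have hB : pvStepB (ins, sizes, recs) t
            = (ins ++ [t], sizes ++ [k], recs) := by
          simp only [pvStepB, hk]
          rw [if_neg h1, if_neg h2]
        rw [hA, hB]
        exact ih _ _ _ (pvBump _ _ _ h)

-- B's second pass (getD into the prefix list) computes pvMkLabels
theorem pvSecondPass (recs : List (String × Nat)) (sizes : List Int)
    (h : ∀ r ∈ recs, r.2 ≤ sizes.length) (d : PySem.Dict String Int) :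
    recs.foldl (fun d r => d.insert r.1 ((pvPrefix sizes).getD r.2 0)) d =
    recs.foldl (fun d r => d.insert r.1 ((sizes.take r.2).sum)) d := by
  induction recs generalizing d with
  | nil => rfl
  | cons r rs ih =>
    simp only [List.foldl_cons]
    rw [(pvPrefix_spec sizes).2 r.2 (h r (by simp))]
    exact ih (fun r hr => h r (by simp [hr])) _

-- ===== VERDICT (by name: the statement is the Claim_ definition above) =====
theorem removeLabels_spec : Claim_equal_removeLabels := by
  intro tokens _ _
  unfold Spec_removeLabels removeLabels removeLabels_alt
  have hmain := pvMain tokens [] [] [] (by simp)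
  have hinv := pvFoldB_inv tokens ([], [], []) (by intro r hr; simp at hr)
  set st := tokens.foldl pvStepB ([], [], []) with hst
  have h0 : tokens.foldl pvStepA (0, [], PySem.Dict.empty)
      = (st.2.1.sum, st.1, pvMkLabels st.2.2 st.2.1) := by
    simpa [pvMkLabels] using hmain
  rw [h0]
  show (st.1, (pvMkLabels st.2.2 st.2.1).items)
      = (st.1, (st.2.2.foldl (fun (d : PySem.Dict String Int) r =>
          d.insert r.1 ((pvPrefix st.2.1).getD r.2 0)) PySem.Dict.empty).items)
  rw [pvSecondPass st.2.2 st.2.1 hinv PySem.Dict.empty]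
  rfl
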